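-- pv_equiv track=rewrite | github.com/Dash10107/dsa-cheatsheet | utils/bit_utils.py | highest_set_bit
-- ===== SOURCE A (Python) =====
-- def highest_set_bit(n):
--     """Return the value of the highest set bit in n (e.g., 12 -> 8)."""
--     if n == 0:
--         return 0
--     msb = 0
--     while n:
--         msb = n
--         n &= n - 1
--     return msb
-- ===== SOURCE B (Python) =====
-- def highest_set_bit(n):
--     """Return the value of the highest set bit in n (e.g., 12 -> 8)."""
--     if n == 0:
--         return 0
--     return 1 << (n.bit_length() - 1)
-- ===== Notes on version B (the rewrite author's own statement) =====
-- stated objective: simpler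
-- what changed: B replaces A's lowest-set-bit-clearing loop with the loop-free closed form: shift one left by bit_length minus one.
-- outside the precondition, e.g. on highest_set_bit(-3): A does not finish within the time limit, B returns 2
import Mathlib
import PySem

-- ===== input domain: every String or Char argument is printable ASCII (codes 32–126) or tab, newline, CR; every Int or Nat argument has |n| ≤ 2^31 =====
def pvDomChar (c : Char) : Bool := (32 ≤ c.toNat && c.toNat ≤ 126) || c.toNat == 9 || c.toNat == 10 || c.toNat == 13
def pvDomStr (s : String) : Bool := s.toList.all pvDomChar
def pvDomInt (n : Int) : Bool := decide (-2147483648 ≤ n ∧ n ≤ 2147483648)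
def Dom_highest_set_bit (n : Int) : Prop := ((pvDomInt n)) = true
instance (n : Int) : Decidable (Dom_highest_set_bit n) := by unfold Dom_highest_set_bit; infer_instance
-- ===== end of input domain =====

-- B replaces A's bit-clearing loop with the loop-free closed form: one shifted left by bit_length minus one;
-- same return value for every n ≥ 0 (Python A does not terminate for n < 0).

-- ===== PORT A =====
-- while n: msb = n; n &= n - 1   (on the nonnegative value; terminates since n &&& (n-1) < n)
def pvALoop (n msb : Nat) : Nat :=
  if h : n = 0 then msb else pvALoop (n &&& (n - 1)) n
termination_by n
decreasing_by exact Nat.lt_of_le_of_lt Nat.and_le_right (by omega)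

def highest_set_bit (n : Int) : Int :=
  if n = 0 then 0 else (pvALoop n.toNat 0 : Int)

-- ===== PORT B =====
-- bit_length of a positive n is Nat.log2 n + 1; result is one shifted left by that minus one.
def highest_set_bit_alt (n : Int) : Int :=
  if n = 0 then 0 else ((1 <<< ((n.natAbs.log2 + 1) - 1) : Nat) : Int)

-- ===== PRECONDITION & SPEC =====
-- Pre_ excludes negative n, on which Python A's `while n: n &= n - 1` never terminates.
def Pre_highest_set_bit (n : Int) : Prop := 0 ≤ n
instance (n : Int) : Decidable (Pre_highest_set_bit n) := by unfold Pre_highest_set_bit; infer_instance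
def pvWitness_highest_set_bit : Int := (12)

def Spec_highest_set_bit (n : Int) (out : Int) : Prop := out = highest_set_bit_alt n
instance (n : Int) (out : Int) : Decidable (Spec_highest_set_bit n out) := by unfold Spec_highest_set_bit; infer_instance

-- ===== CLAIM (what is proved, stated in full; the proofs are below) =====
def Claim_equal_highest_set_bit : Prop := ∀ (n : Int), Dom_highest_set_bit n → Pre_highest_set_bit n → Spec_highest_set_bit n (highest_set_bit n)

-- ===== LEMMAS AND PROOFS =====

-- Clearing the lowest set bit keeps the highest one (when the result is nonzero).
theorem pv_and_sub_one_log2 {n : Nat} (h0 : n ≠ 0) (hm : n &&& (n - 1) ≠ 0) :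
    (n &&& (n - 1)).log2 = n.log2 := by
  have hnp : ¬ n.isPowerOfTwo := by
    intro hp
    exact hm (Nat.ne_zero_and_sub_one_eq_zero_iff_isPowerOfTwo.mpr hp).2
  have htop : (n &&& (n - 1)).testBit n.log2 = true :=
    Nat.and_sub_one_testBit_log2 h0 hnp
  have hge : 2 ^ n.log2 ≤ n &&& (n - 1) := Nat.ge_two_pow_of_testBit htop
  have h1 : n.log2 ≤ (n &&& (n - 1)).log2 := (Nat.le_log2 hm).mpr hge
  have h2 : (n &&& (n - 1)).log2 ≤ n.log2 := by
    refine (Nat.le_log2 h0).mpr ?_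
    calc 2 ^ (n &&& (n - 1)).log2 ≤ n &&& (n - 1) := Nat.log2_self_le hm
    _ ≤ n - 1 := Nat.and_le_right
    _ ≤ n := Nat.sub_le n 1
  omega

theorem pvALoop_eq : ∀ (n : Nat), n ≠ 0 → ∀ (msb : Nat), pvALoop n msb = 2 ^ n.log2 := by
  intro n
  induction n using Nat.strong_induction_on with
  | _ n ih =>
    intro h msb
    rw [pvALoop]
    simp only [h, dite_false]
    by_cases hm : n &&& (n - 1) = 0
    · rw [hm, pvALoop]
      simp only [dite_true]
      obtain ⟨k, hk⟩ := Nat.ne_zero_and_sub_one_eq_zero_iff_isPowerOfTwo.mp ⟨h, hm⟩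
      rw [hk, Nat.log2_two_pow]
    · have hlt : n &&& (n - 1) < n := Nat.lt_of_le_of_lt Nat.and_le_right (by omega)
      rw [ih _ hlt hm n, pv_and_sub_one_log2 h hm]

-- ===== VERDICT (by name: the statement is the Claim_ definition above) =====
theorem highest_set_bit_spec : Claim_equal_highest_set_bit := by
  intro n _ hpre
  unfold Spec_highest_set_bit highest_set_bit highest_set_bit_alt
  by_cases h0 : n = 0
  · simp [h0]
  · simp only [h0, if_false]
    have hnz : n.toNat ≠ 0 := by
      have : 0 < n := lt_of_le_of_ne hpre (Ne.symm h0)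
      omega
    have habs : n.natAbs = n.toNat := by omega
    rw [pvALoop_eq _ hnz 0, habs, Nat.shiftLeft_eq, Nat.one_mul,
      Nat.add_sub_cancel]
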